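-- pv_equiv track=rewrite | github.com/Epidani1/leetcode | binaryGap.py | gap
-- ===== SOURCE A (Python) =====
-- def gap(num):
--     counter, temp, flag = 0, [], 0
--
--     for i in range(len(num)):
--         if num[i] == '1' and flag == 0:
--             flag = 1
--         elif num[i] == '1' and flag != 0:
--             counter += 1
--             temp.append(counter)
--             counter = 0
--         else:
--             counter += 1
--     return max(temp) if temp else 0
-- ===== SOURCE B (Python) =====
-- def gap(num):
--     ones = [i for i, c in enumerate(num) if c == '1']
--     return max((b - a for a, b in zip(ones, ones[1:])), default=0)
-- ===== Notes on version B (the rewrite author's own statement) =====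
-- stated objective: simpler
-- what changed: Replaces A's stateful single-pass flag/counter/temp accumulator with collecting the indices of the one-characters and taking the maximum difference of consecutive indices.
-- intended difference: On strings with at least two one-characters whose first one-character is preceded by other characters and where that inflated first gap dominates all later gaps, A returns the absolute index of the second one-character (it never resets its counter at the first one, so the leading prefix is counted into the first gap: A gives 3 on the witness 0011), while B returns the true maximum distance between consecutive one-characters, which is the intended binary gap (B gives 1 there). — e.g. on gap("0011"): A returns 3, B returns 1
import Mathlib
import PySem

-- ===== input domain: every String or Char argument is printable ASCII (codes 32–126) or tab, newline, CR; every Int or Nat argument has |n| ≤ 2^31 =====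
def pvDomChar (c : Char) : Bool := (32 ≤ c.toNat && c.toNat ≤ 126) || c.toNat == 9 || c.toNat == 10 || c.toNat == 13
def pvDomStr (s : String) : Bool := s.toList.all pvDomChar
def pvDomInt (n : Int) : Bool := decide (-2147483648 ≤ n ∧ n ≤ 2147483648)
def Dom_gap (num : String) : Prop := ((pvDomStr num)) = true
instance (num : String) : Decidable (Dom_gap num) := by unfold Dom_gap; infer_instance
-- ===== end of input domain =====

-- B replaces A's stateful flag/counter/temp scan with "positions of '1's, then max
-- consecutive difference" (simpler decomposition); return values proved equal outside D_gap.

-- ===== PORT A =====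
-- literal port of A's for-loop: state (counter, temp, flag), same branch order
def gapLoop : List Char → Int → List Int → Int → List Int
  | [], _, temp, _ => temp
  | c :: rest, counter, temp, flag =>
    if c = '1' ∧ flag = 0 then gapLoop rest counter temp 1
    else if c = '1' ∧ flag ≠ 0 then gapLoop rest 0 (temp ++ [counter + 1]) flag
    else gapLoop rest (counter + 1) temp flag

def gap (num : String) : Int :=
  -- max(temp) if temp else 0
  match PySem.List.max? (gapLoop num.toList 0 [] 0) (fun x => x) with
  | some m => m
  | none => 0

-- ===== PORT B =====
def gap_alt (num : String) : Int :=
  let ones : List Int :=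
    ((PySem.List.enumerate num.toList 0).filter (fun p => p.2 == '1')).map (fun p => p.1)
  let diffs : List Int := (ones.zip ones.tail).map (fun p => p.2 - p.1)
  -- max(gen, default=0)
  match PySem.List.max? diffs (fun x => x) with
  | some m => m
  | none => 0

-- ===== PRECONDITION & SPEC =====
-- On strings with at least two one-characters whose first one-character is preceded by other
-- characters and where that inflated first gap dominates all later gaps, A returns the absolute
-- index of the second one-character (it never resets its counter at the first one, so the leading
-- prefix is counted into the first gap), while B returns the true maximum distance between
-- consecutive one-characters, which is the intended binary gap.
def D_gap (num : String) : Prop :=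
  let o := num.toList.findIdxs (· == '1')
  o.headD 0 ≠ 0 ∧ 2 ≤ o.length ∧ List.IsChain (fun a b => b < o.getD 1 0 + a) o.tail
-- the instance decides D_gap through an equal tail-recursion-friendly computation (zipIdx/filter),
-- so it evaluates on large literal inputs; zipIdx_ones (cited here by name) proves the two equal
theorem zipIdx_ones (l : List Char) : ∀ (s : Nat),
    ((l.zipIdx s).filter (fun p => p.1 == '1')).map (fun p => p.2) =
      l.findIdxs (fun c => c == '1') s := by
  induction l with
  | nil => intro s; simp
  | cons ch r ih =>
    intro s
    by_cases h : ch = '1' <;> simp [List.zipIdx_cons, List.findIdxs_cons, h, ih (s + 1)]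

instance (num : String) : Decidable (D_gap num) :=
  decidable_of_iff
    (let o := (num.toList.zipIdx.filter (fun p => p.1 == '1')).map (fun p => p.2)
     o.headD 0 ≠ 0 ∧ 2 ≤ o.length ∧ List.IsChain (fun a b => b < o.getD 1 0 + a) o.tail)
    (by unfold D_gap; rw [zipIdx_ones num.toList 0])

def Spec_gap (num : String) (out : Int) : Prop := ¬ D_gap num → out = gap_alt num
instance (num : String) (out : Int) : Decidable (Spec_gap num out) := by unfold Spec_gap; infer_instance

def pvDiffWitness_gap : String := "0011"
def pvDiffWitnessOut_gap : Int × Int := (3, 1)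

-- ===== CLAIM (what is proved, stated in full; the proofs are below) =====
def Claim_unchanged_gap : Prop := ∀ (num : String), Dom_gap num → Spec_gap num (gap num)
def Claim_changed_gap : Prop := Dom_gap (pvDiffWitness_gap) ∧ D_gap (pvDiffWitness_gap) ∧ gap (pvDiffWitness_gap) = pvDiffWitnessOut_gap.1 ∧ gap_alt (pvDiffWitness_gap) = pvDiffWitnessOut_gap.2 ∧ pvDiffWitnessOut_gap.1 ≠ pvDiffWitnessOut_gap.2
def Claim_exact_gap : Prop := ∀ (num : String), Dom_gap num → D_gap num → gap num ≠ gap_alt num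

-- ===== LEMMAS AND PROOFS =====

-- proof-side: absolute indices of '1' characters
def onesIdx : List Char → Int → List Int
  | [], _ => []
  | c :: r, i => if c = '1' then i :: onesIdx r (i + 1) else onesIdx r (i + 1)

theorem onesIdx_eq_findIdxs (l : List Char) : ∀ (s : Nat),
    onesIdx l (s : Int) = (l.findIdxs (fun c => c == '1') s).map (fun n : Nat => (n : Int)) := by
  induction l with
  | nil => intro s; simp [onesIdx]
  | cons ch r ih =>
    intro s
    have hcast : ((s : Int) + 1) = ((s + 1 : Nat) : Int) := by push_cast; ring
    by_cases h : ch = '1'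
    · simp only [onesIdx, if_pos h, hcast, ih (s + 1), List.findIdxs_cons]
      simp [h]
    · simp only [onesIdx, if_neg h, hcast, ih (s + 1), List.findIdxs_cons]
      simp [h]

theorem ones_cast (l : List Char) :
    onesIdx l 0 = (l.findIdxs (fun c => c == '1')).map (fun n : Nat => (n : Int)) := by
  simpa using onesIdx_eq_findIdxs l 0

theorem isChain_zip {α : Type} (R : α → α → Prop) (xs : List α) :
    List.IsChain R xs ↔ ∀ p ∈ xs.zip xs.tail, R p.1 p.2 := by
  induction xs with
  | nil => simp
  | cons x t ih =>
    cases t with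
    | nil => simp
    | cons y t' =>
      rw [List.isChain_cons_cons, ih]
      simp only [List.tail_cons, List.zip_cons_cons, List.mem_cons]
      constructor
      · rintro ⟨hxy, h⟩ p (rfl | hp)
        · exact hxy
        · exact h p hp
      · intro h
        exact ⟨h (x, y) (Or.inl rfl), fun p hp => h p (Or.inr hp)⟩

-- proof-side characterisations of A's loop
def gaps : List Char → Int → List Int
  | [], _ => []
  | c :: r, cnt => if c = '1' then (cnt + 1) :: gaps r 0 else gaps r (cnt + 1)

def gaps0 : List Char → Int → List Int
  | [], _ => []
  | c :: r, cnt => if c = '1' then gaps r cnt else gaps0 r (cnt + 1)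

def gapsOfPos : List Int → Int → List Int
  | [], _ => []
  | q :: qs, base => (q - base) :: gapsOfPos qs q

def dffs (os : List Int) : List Int := (os.zip os.tail).map (fun p => p.2 - p.1)

def mx (xs : List Int) : Int :=
  match PySem.List.max? xs (fun x => x) with
  | some m => m
  | none => 0

theorem mx_nil : mx [] = 0 := by decide

theorem mx_cons (x : Int) (t : List Int) : mx (x :: t) = t.foldl max x := by
  simp [mx, PySem.List.max?_id_cons]

theorem gapLoop_one (l : List Char) : ∀ (c : Int) (t : List Int),
    gapLoop l c t 1 = t ++ gaps l c := by
  induction l with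
  | nil => intro c t; simp [gapLoop, gaps]
  | cons ch r ih =>
    intro c t
    by_cases h : ch = '1' <;> simp [gapLoop, gaps, h, ih]

theorem gapLoop_zero (l : List Char) : ∀ (c : Int) (t : List Int),
    gapLoop l c t 0 = t ++ gaps0 l c := by
  induction l with
  | nil => intro c t; simp [gapLoop, gaps0]
  | cons ch r ih =>
    intro c t
    by_cases h : ch = '1' <;> simp [gapLoop, gaps0, h, ih, gapLoop_one]

theorem gaps_spec (l : List Char) : ∀ (c s : Int),
    gaps l c = gapsOfPos (onesIdx l s) (s - c - 1) := by
  induction l with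
  | nil => intro c s; simp [gaps, onesIdx, gapsOfPos]
  | cons ch r ih =>
    intro c s
    by_cases h : ch = '1'
    · have h2 : gaps r 0 = gapsOfPos (onesIdx r (s + 1)) s := by
        have := ih 0 (s + 1); simpa using this
      simp [gaps, onesIdx, gapsOfPos, h, h2]
      omega
    · have h2 : gaps r (c + 1) = gapsOfPos (onesIdx r (s + 1)) (s - c - 1) := by
        have := ih (c + 1) (s + 1); simpa using this
      simp [gaps, onesIdx, h, h2]

theorem gaps0_spec (l : List Char) : ∀ (s : Int),
    gaps0 l s = gapsOfPos (onesIdx l s).tail 0 := by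
  induction l with
  | nil => intro s; simp [gaps0, onesIdx, gapsOfPos]
  | cons ch r ih =>
    intro s
    by_cases h : ch = '1'
    · have h2 : gaps r s = gapsOfPos (onesIdx r (s + 1)) 0 := by
        have := gaps_spec r s (s + 1); simpa using this
      simp [gaps0, onesIdx, h, h2]
    · simp [gaps0, onesIdx, h, ih (s + 1)]

theorem gapsOfPos_eq_dffs (qs : List Int) : ∀ (b : Int), gapsOfPos qs b = dffs (b :: qs) := by
  induction qs with
  | nil => intro b; simp [gapsOfPos, dffs]
  | cons q qs' ih =>
    intro b
    simp only [gapsOfPos, ih q, dffs, List.zip_cons_cons, List.tail_cons, List.map_cons]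

theorem enum_ones (l : List Char) : ∀ (s : Int),
    ((PySem.List.enumerate l s).filter (fun p => p.2 == '1')).map (fun p => p.1) = onesIdx l s := by
  induction l with
  | nil => intro s; simp [PySem.List.enumerate_nil, onesIdx]
  | cons ch r ih =>
    intro s
    by_cases h : ch = '1' <;>
      simp [PySem.List.enumerate_cons, onesIdx, h, ih (s + 1)]

theorem gap_eq (num : String) : gap num = mx (gapsOfPos (onesIdx num.toList 0).tail 0) := by
  have h := gapLoop_zero num.toList 0 []
  simp only [List.nil_append] at h
  simp [gap, mx, h, gaps0_spec]

theorem gap_alt_eq (num : String) : gap_alt num = mx (dffs (onesIdx num.toList 0)) := by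
  simp [gap_alt, mx, dffs, enum_ones]

theorem foldl_max_swap (L : List Int) : ∀ (a c : Int),
    L.foldl max (max a c) = max a (L.foldl max c) := by
  induction L with
  | nil => intro a c; simp
  | cons e L' ih =>
    intro a c
    simp only [List.foldl_cons]
    rw [max_assoc, ih]

theorem foldl_max_eq (L : List Int) (a b d : Int) (hd : d ∈ L) (ha : a ≤ d) (hb : b ≤ d) :
    L.foldl max a = L.foldl max b := by
  cases L with
  | nil => simp at hd
  | cons c L' =>
    have hF := PySem.List.le_foldl_max L' c
    have hdF : d ≤ L'.foldl max c := by
      rcases List.mem_cons.mp hd with rfl | h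
      · exact hF.1
      · exact hF.2 d h
    simp only [List.foldl_cons]
    rw [show max a c = max (max a c) c by simp, show max b c = max (max b c) c by simp]
    rw [foldl_max_swap L' (max a c) c, foldl_max_swap L' (max b c) c]
    have : a ≤ L'.foldl max c := le_trans ha hdF
    have : b ≤ L'.foldl max c := le_trans hb hdF
    omega

theorem foldl_max_of_le (L : List Int) : ∀ (a : Int), (∀ y ∈ L, y ≤ a) → L.foldl max a = a := by
  induction L with
  | nil => intro a _; simp
  | cons c L' ih =>
    intro a h
    simp only [List.foldl_cons]
    have hc : c ≤ a := h c (List.mem_cons_self)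
    rw [max_eq_left hc]
    exact ih a (fun y hy => h y (List.mem_cons_of_mem _ hy))

theorem zip_cast_forall (k : Nat) (xs : List Nat) : ∀ (ys : List Nat),
    (∀ p ∈ ((xs.map (fun n : Nat => (n : Int))).zip (ys.map (fun n : Nat => (n : Int)))),
        p.2 - p.1 < (k : Int)) ↔
    (∀ p ∈ xs.zip ys, p.2 < k + p.1) := by
  induction xs with
  | nil => intro ys; simp
  | cons x xs' ih =>
    intro ys
    cases ys with
    | nil => simp
    | cons y ys' =>
      simp only [List.map_cons, List.zip_cons_cons, List.forall_mem_cons]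
      exact and_congr (by omega) (ih ys')

theorem D_char (num : String) (n1 n2 : Nat) (ns : List Nat)
    (hfi : num.toList.findIdxs (fun c => c == '1') = n1 :: n2 :: ns) :
    D_gap num ↔ ((n1 : Int) ≠ 0 ∧
      ∀ p ∈ (((n2 : Int) :: ns.map (fun n : Nat => (n : Int))).zip (ns.map (fun n : Nat => (n : Int)))),
        p.2 - p.1 < (n2 : Int)) := by
  unfold D_gap
  rw [hfi]
  simp only [List.headD_cons, List.tail_cons, List.length_cons, List.getD_cons_succ,
    List.getD_cons_zero, isChain_zip]
  have hz := zip_cast_forall n2 (n2 :: ns) ns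
  simp only [List.map_cons] at hz
  constructor
  · rintro ⟨h1, -, h2⟩
    exact ⟨by exact_mod_cast h1, hz.mpr h2⟩
  · rintro ⟨h1, h2⟩
    exact ⟨by exact_mod_cast h1, by omega, hz.mp h2⟩

theorem gap_spec : Claim_unchanged_gap := by
  unfold Claim_unchanged_gap Spec_gap
  intro num _ hnd
  rw [gap_eq, gap_alt_eq, ones_cast]
  rcases hfi : num.toList.findIdxs (fun c => c == '1') with _ | ⟨n1, _ | ⟨n2, ns⟩⟩
  · simp [gapsOfPos, dffs, mx_nil]
  · simp [gapsOfPos, dffs, mx_nil]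
  · rw [D_char num n1 n2 ns hfi] at hnd
    simp only [List.map_cons, List.tail_cons]
    set p1 : Int := (n1 : Int) with hp1def
    set p2 : Int := (n2 : Int) with hp2def
    set rest : List Int := ns.map (fun n : Nat => (n : Int)) with hrestdef
    have hA : gapsOfPos (p2 :: rest) 0 = (p2 - 0) :: dffs (p2 :: rest) := by
      rw [gapsOfPos_eq_dffs]; simp [dffs]
    have hB : dffs (p1 :: p2 :: rest) = (p2 - p1) :: dffs (p2 :: rest) := by
      simp [dffs]
    rw [hA, hB, mx_cons, mx_cons]
    by_cases hp1 : p1 = 0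
    · rw [hp1]
    · have hex : ¬ ∀ p ∈ (p2 :: rest).zip rest, p.2 - p.1 < p2 :=
        fun hall => hnd ⟨hp1, hall⟩
      rcases not_forall.mp hex with ⟨p, hp⟩
      rcases Classical.not_imp.mp hp with ⟨hpmem, hplt⟩
      rw [not_lt] at hplt
      have hp1nn : (0 : Int) ≤ p1 := hp1def ▸ Int.natCast_nonneg n1
      have hd : p.2 - p.1 ∈ dffs (p2 :: rest) := by
        simp only [dffs, List.tail_cons, List.mem_map]
        exact ⟨p, hpmem, rfl⟩
      exact foldl_max_eq _ _ _ _ hd (by omega) (by omega)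

theorem gap_changed : Claim_changed_gap := by unfold Claim_changed_gap; decide

theorem gap_tight : Claim_exact_gap := by
  unfold Claim_exact_gap
  intro num _ hD
  rw [gap_eq, gap_alt_eq, ones_cast]
  rcases hfi : num.toList.findIdxs (fun c => c == '1') with _ | ⟨n1, _ | ⟨n2, ns⟩⟩
  · unfold D_gap at hD; rw [hfi] at hD; simp at hD
  · unfold D_gap at hD; rw [hfi] at hD; simp at hD
  · obtain ⟨hp1, hlt⟩ := (D_char num n1 n2 ns hfi).mp hD
    simp only [List.map_cons, List.tail_cons]
    set p1 : Int := (n1 : Int) with hp1def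
    set p2 : Int := (n2 : Int) with hp2def
    set rest : List Int := ns.map (fun n : Nat => (n : Int)) with hrestdef
    have hA : gapsOfPos (p2 :: rest) 0 = (p2 - 0) :: dffs (p2 :: rest) := by
      rw [gapsOfPos_eq_dffs]; simp [dffs]
    have hB : dffs (p1 :: p2 :: rest) = (p2 - p1) :: dffs (p2 :: rest) := by
      simp [dffs]
    rw [hA, hB, mx_cons, mx_cons]
    have hall : ∀ y ∈ dffs (p2 :: rest), y < p2 := by
      intro y hy
      simp only [dffs, List.tail_cons, List.mem_map] at hy
      obtain ⟨a, hmem, rfl⟩ := hy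
      exact hlt a hmem
    have hAval : (dffs (p2 :: rest)).foldl max (p2 - 0) = p2 := by
      rw [show p2 - 0 = p2 by ring]
      exact foldl_max_of_le _ p2 (fun y hy => le_of_lt (hall y hy))
    have hp1nn : (0 : Int) ≤ p1 := hp1def ▸ Int.natCast_nonneg n1
    have hBval : (dffs (p2 :: rest)).foldl max (p2 - p1) < p2 := by
      rcases PySem.List.foldl_max_mem (dffs (p2 :: rest)) (p2 - p1) with h | h
      · rw [h]; omega
      · exact hall _ h
    omega
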